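-- pv_equiv track=rewrite | github.com/sak007/Door-Status-Detector | code/classifier/subscriber.py | downsampleToNPoints
-- ===== SOURCE A (Python) =====
-- MaxSamples = 600 # Num Gx Samples for Model
--
-- def nList(n):
--     myList = []
--     for i in range(n):
--         myList.append([])
--     return myList
--
-- def downsample(data, factor):
--     downData = nList(factor)
--     nValsPerSplit = int(len(data) / factor)
--     for i in range(nValsPerSplit):
--         for j in range(factor):
--             index = i * factor + j
--             downData[j].append(data[index])
--     return downData
--
-- def downsampleToNPoints(data, n):
--     if len(data) > n:
--         factor = 2
--         while True:
--             dVals = downsample(data,factor)[0]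
--             if len(dVals) < MaxSamples:
--                 break
--             else:
--                 factor += 1
--         return dVals, factor
--     return data, 1
-- ===== SOURCE B (Python) =====
-- MaxSamples = 600 # Num Gx Samples for Model
--
-- def downsampleToNPoints(data, n):
--     # Compute the minimal factor >= 2 with len(data)//factor < MaxSamples
--     # directly, then take every factor-th element in one pass.
--     L = len(data)
--     if L > n:
--         factor = max(2, L // MaxSamples + 1)
--         return [data[i * factor] for i in range(L // factor)], factor
--     return data, 1
-- ===== Notes on version B (the rewrite author's own statement) =====
-- stated objective: faster
-- what changed: Replaces the trial loop that re-runs downsample() for factor = 2,3,... with a closed-form minimal factor (max(2, len//MaxSamples + 1)) and a single strided comprehension that extracts only the first split.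
import Mathlib
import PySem

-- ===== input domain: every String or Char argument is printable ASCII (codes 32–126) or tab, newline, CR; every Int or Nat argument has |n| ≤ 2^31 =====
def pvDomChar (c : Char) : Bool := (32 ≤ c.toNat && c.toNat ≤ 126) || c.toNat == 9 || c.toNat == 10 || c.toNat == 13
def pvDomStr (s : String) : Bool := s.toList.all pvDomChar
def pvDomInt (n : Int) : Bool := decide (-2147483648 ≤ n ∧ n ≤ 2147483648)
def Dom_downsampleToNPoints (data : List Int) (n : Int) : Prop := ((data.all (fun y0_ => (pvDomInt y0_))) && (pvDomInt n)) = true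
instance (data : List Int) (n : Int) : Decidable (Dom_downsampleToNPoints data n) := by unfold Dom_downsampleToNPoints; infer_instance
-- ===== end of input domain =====

-- B computes the minimal downsampling factor in closed form and extracts the first split
-- with one strided pass, instead of A's trial loop re-running downsample() per factor (objective: faster).

-- ===== PORT A =====
-- nList(n): append [] n times
def nListA (n : Nat) : List (List Int) :=
  (List.range n).foldl (fun myList _ => myList ++ [[]]) []

-- downsample(data, factor). int(len(data)/factor) is ported as Nat floor division,
-- exact for list lengths below 2^53 (Python truncates the exact nonnegative quotient).
-- data[index] is always in range here, ported as getD with default 0.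
def downsampleA (data : List Int) (factor : Nat) : List (List Int) :=
  let downData := nListA factor
  let nValsPerSplit := data.length / factor
  (List.range nValsPerSplit).foldl (fun dd i =>
    (List.range factor).foldl (fun dd2 j =>
      dd2.set j ((dd2.getD j []) ++ [data.getD (i * factor + j) 0])) dd) downData

-- helper lemmas the port's termination proof needs (cited by aLoop's decreasing_by)
lemma foldl_append_nil_eq (l : List Nat) :
    ∀ (acc : List (List Int)),
      l.foldl (fun myList _ => myList ++ [[]]) acc = acc ++ List.replicate l.length [] := by
  induction l with
  | nil => intro acc; simp
  | cons a t ih =>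
    intro acc
    simp only [List.foldl_cons, List.length_cons, ih, List.replicate_succ]
    simp [List.append_assoc]

lemma nListA_eq (n : Nat) : nListA n = List.replicate n [] := by
  rw [nListA]; rw [foldl_append_nil_eq]; simp

lemma foldl_set_length (g : List (List Int) → Nat → List Int) (l : List Nat) :
    ∀ (dd : List (List Int)), (l.foldl (fun dd j => dd.set j (g dd j)) dd).length = dd.length := by
  induction l with
  | nil => intro dd; rfl
  | cons a t ih => intro dd; simp [List.foldl_cons, ih]

lemma headD_set_ne (dd : List (List Int)) (j : Nat) (v : List Int) (hj : j ≠ 0) :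
    (dd.set j v).headD [] = dd.headD [] := by
  cases dd with
  | nil => rfl
  | cons a t =>
    cases j with
    | zero => exact absurd rfl hj
    | succ j' => rfl

lemma foldl_set_pos_headD (g : List (List Int) → Nat → List Int) (l : List Nat)
    (hl : ∀ j ∈ l, j ≠ 0) :
    ∀ (dd : List (List Int)),
      ((l.foldl (fun dd j => dd.set j (g dd j)) dd).headD []) = dd.headD [] := by
  induction l with
  | nil => intro dd; rfl
  | cons a t ih =>
    intro dd
    simp only [List.foldl_cons]
    rw [ih (fun j hj => hl j (List.mem_cons_of_mem a hj))]
    exact headD_set_ne dd a _ (hl a (List.mem_cons_self))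

lemma inner_headD (v : Nat → Int) (f : Nat) (hf : 1 ≤ f) (dd : List (List Int)) (hne : dd ≠ []) :
    ((List.range f).foldl (fun dd2 j => dd2.set j ((dd2.getD j []) ++ [v j])) dd).headD []
      = dd.headD [] ++ [v 0] := by
  obtain ⟨f', rfl⟩ : ∃ f', f = f' + 1 := ⟨f - 1, by omega⟩
  rw [List.range_succ_eq_map]
  simp only [List.foldl_cons]
  rw [foldl_set_pos_headD _ _ (by simp)]
  cases dd with
  | nil => exact absurd rfl hne
  | cons a t => rfl

lemma outer_headD (data : List Int) (f : Nat) (hf : 1 ≤ f) (N : Nat) :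
    ∀ (dd : List (List Int)), dd.length = f →
      ((List.range N).foldl (fun dd i =>
          (List.range f).foldl (fun dd2 j =>
            dd2.set j ((dd2.getD j []) ++ [data.getD (i * f + j) 0])) dd) dd).headD []
        = dd.headD [] ++ (List.range N).map (fun i => data.getD (i * f) 0) := by
  induction N with
  | zero => intro dd _; simp
  | succ N ih =>
    intro dd hdd
    rw [List.range_succ, List.foldl_append]
    simp only [List.foldl_cons, List.foldl_nil]
    have hlen : ((List.range N).foldl (fun dd i =>
        (List.range f).foldl (fun dd2 j =>
          dd2.set j ((dd2.getD j []) ++ [data.getD (i * f + j) 0])) dd) dd).length = f := by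
      clear ih
      induction (List.range N) generalizing dd with
      | nil => simpa
      | cons a t iht => simp only [List.foldl_cons]; exact iht _ (by rw [foldl_set_length]; exact hdd)
    have hne : ((List.range N).foldl (fun dd i =>
        (List.range f).foldl (fun dd2 j =>
          dd2.set j ((dd2.getD j []) ++ [data.getD (i * f + j) 0])) dd) dd) ≠ [] := by
      intro h; rw [h] at hlen; simp at hlen; omega
    rw [inner_headD (fun j => data.getD (N * f + j) 0) f hf _ hne, ih dd hdd]
    simp [List.append_assoc]

lemma downsampleA_headD (data : List Int) (f : Nat) (hf : 1 ≤ f) :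
    (downsampleA data f).headD []
      = (List.range (data.length / f)).map (fun i => data.getD (i * f) 0) := by
  unfold downsampleA
  rw [nListA_eq]
  rw [outer_headD data f hf _ (List.replicate f []) (by simp)]
  obtain ⟨f', rfl⟩ : ∃ f', f = f' + 1 := ⟨f - 1, by omega⟩
  simp [List.replicate_succ]

-- the while-loop of downsampleToNPoints: factor = 2, 3, ... until len(dVals) < MaxSamples
def aLoop (data : List Int) (factor : Nat) : List Int × Int :=
  let dVals := (downsampleA data factor).headD []
  if h : dVals.length < 600 then (dVals, (factor : Int))
  else aLoop data (factor + 1)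
termination_by data.length + 2 - factor
decreasing_by
  have h' : ¬ ((downsampleA data factor).headD []).length < 600 := h
  rcases Nat.eq_zero_or_pos factor with h0 | h0
  · subst h0
    simp [downsampleA, nListA] at h'
  · rw [downsampleA_headD data factor h0] at h'
    simp only [List.length_map, List.length_range, not_lt] at h'
    have h1 : 600 * factor ≤ data.length := (Nat.le_div_iff_mul_le h0).mp h'
    omega

def downsampleToNPoints (data : List Int) (n : Int) : List Int × Int :=
  if (data.length : Int) > n then aLoop data 2 else (data, 1)

-- ===== PORT B =====
def downsampleToNPoints_alt (data : List Int) (n : Int) : List Int × Int :=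
  let L := data.length
  if (L : Int) > n then
    let factor := max 2 (L / 600 + 1)
    ((List.range (L / factor)).map (fun i => data.getD (i * factor) 0), (factor : Int))
  else (data, 1)

-- ===== PRECONDITION & SPEC =====
def Spec_downsampleToNPoints (data : List Int) (n : Int) (out : List Int × Int) : Prop := out = downsampleToNPoints_alt data n
instance (data : List Int) (n : Int) (out : List Int × Int) : Decidable (Spec_downsampleToNPoints data n out) := by unfold Spec_downsampleToNPoints; infer_instance

-- ===== CLAIM (what is proved, stated in full; the proofs are below) =====
def Claim_equal_downsampleToNPoints : Prop := ∀ (data : List Int) (n : Int), Dom_downsampleToNPoints data n → Spec_downsampleToNPoints data n (downsampleToNPoints data n)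

-- ===== LEMMAS AND PROOFS =====

-- m/F < 600 for F = max 2 (m/600 + 1)
lemma div_F_lt (m : Nat) : m / max 2 (m / 600 + 1) < 600 := by
  have hF : 0 < max 2 (m / 600 + 1) := by omega
  rw [Nat.div_lt_iff_lt_mul hF]
  have h1 : m < 600 * (m / 600 + 1) := by
    have hdm := Nat.div_add_mod m 600
    have hml := Nat.mod_lt m (show 0 < 600 by norm_num)
    omega
  calc m < 600 * (m / 600 + 1) := h1
    _ ≤ 600 * max 2 (m / 600 + 1) := Nat.mul_le_mul_left _ (le_max_right _ _)

-- below F the loop does not stop: 600 ≤ m/f for 2 ≤ f < F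
lemma div_ge_of_lt_F (m f : Nat) (hf2 : 2 ≤ f) (hfF : f < max 2 (m / 600 + 1)) :
    600 ≤ m / f := by
  have hq : f ≤ m / 600 := by omega
  have hq0 : 0 < m / 600 := by omega
  have h1 : 600 ≤ m / (m / 600) := by
    rw [Nat.le_div_iff_mul_le hq0]
    calc 600 * (m / 600) = m / 600 * 600 := by ring
      _ ≤ m := Nat.div_mul_le_self m 600
  calc 600 ≤ m / (m / 600) := h1
    _ ≤ m / f := Nat.div_le_div_left hq (by omega)

lemma aLoop_eq_of_le (data : List Int) :
    ∀ (k f : Nat), 2 ≤ f → f + k = max 2 (data.length / 600 + 1) →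
      aLoop data f
        = ((List.range (data.length / max 2 (data.length / 600 + 1))).map
            (fun i => data.getD (i * max 2 (data.length / 600 + 1)) 0),
           ((max 2 (data.length / 600 + 1) : Nat) : Int)) := by
  intro k
  induction k with
  | zero =>
    intro f hf2 hfF
    rw [aLoop]
    simp only [downsampleA_headD data f (by omega)]
    have hlt : data.length / f < 600 := by
      rw [Nat.add_zero] at hfF; rw [hfF]; exact div_F_lt data.length
    rw [Nat.add_zero] at hfF
    subst hfF
    simp [hlt]
  | succ k ih =>
    intro f hf2 hfF
    rw [aLoop]
    simp only [downsampleA_headD data f (by omega)]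
    have hge : 600 ≤ data.length / f := div_ge_of_lt_F data.length f hf2 (by omega)
    have hnlt : ¬ ((List.range (data.length / f)).map (fun i => data.getD (i * f) 0)).length < 600 := by
      simp only [List.length_map, List.length_range]; omega
    simp only [hnlt, dite_false]
    exact ih (f + 1) (by omega) (by omega)

-- ===== VERDICT (by name: the statement is the Claim_ definition above) =====
theorem downsampleToNPoints_spec : Claim_equal_downsampleToNPoints := by
  intro data n _
  unfold Spec_downsampleToNPoints downsampleToNPoints downsampleToNPoints_alt
  by_cases h : (data.length : Int) > n
  · simp only [h, if_true]
    exact aLoop_eq_of_le data (max 2 (data.length / 600 + 1) - 2) 2 (le_refl 2) (by omega)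
  · simp [h]
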